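-- pv_equiv track=rewrite | github.com/rdh1115/NLP_code_examples | removing_bias_skipgram_cbow/code.py | build_current_surrounding_pairs
-- ===== SOURCE A (Python) =====
-- def build_current_surrounding_pairs(indices: "list[int]", window_size: int = 2):
--     sur = list()
--     cur = list()
--     l = len(indices)
--
--     for i, w in enumerate(indices):
--         if window_size <= i <= l - 1 - window_size:
--             cur.append(w)
--             windows = [i + j for j in
--                        range(-window_size, window_size + 1, 1)
--                        if (i + j >= 0) &
--                        (i + j < l) &
--                        (j != 0)]
--             sur.append([indices[idx] for idx in windows])
--     return sur, cur
-- ===== SOURCE B (Python) =====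
-- def build_current_surrounding_pairs(indices: "list[int]", window_size: int = 2):
--     l = len(indices)
--     sur = [indices[i - window_size:i] + indices[i + 1:i + window_size + 1]
--            for i in range(window_size, l - window_size)]
--     cur = indices[window_size:l - window_size]
--     return sur, cur
-- ===== Notes on version B (the rewrite author's own statement) =====
-- stated objective: simpler
-- what changed: B drops A's enumerate loop with membership guard and the filtered inner index comprehension: the center list is one direct slice and each context list is the concatenation of two contiguous slices.
-- outside the precondition, e.g. on build_current_surrounding_pairs([0, 1], -1): A returns ([[], []], [0, 1]), B returns ([[0, 0], [], [], []], [1])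
import Mathlib
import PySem

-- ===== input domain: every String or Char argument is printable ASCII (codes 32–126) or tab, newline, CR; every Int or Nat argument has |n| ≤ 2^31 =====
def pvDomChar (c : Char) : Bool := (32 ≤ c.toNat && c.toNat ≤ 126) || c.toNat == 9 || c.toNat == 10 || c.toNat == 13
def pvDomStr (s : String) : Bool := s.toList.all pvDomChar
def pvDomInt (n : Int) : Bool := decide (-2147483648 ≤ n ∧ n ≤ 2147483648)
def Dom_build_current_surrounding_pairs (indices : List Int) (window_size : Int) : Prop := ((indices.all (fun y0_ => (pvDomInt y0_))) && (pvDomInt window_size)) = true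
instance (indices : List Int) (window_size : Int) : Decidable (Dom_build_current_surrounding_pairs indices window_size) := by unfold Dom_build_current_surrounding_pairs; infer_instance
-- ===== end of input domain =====

-- B replaces A's enumerate loop + filtered inner index comprehension by plain slice extraction (objective: simpler).


-- ===== PORT A =====
-- literal port of A: enumerate loop, guard window_size <= i <= l-1-window_size, inner filtered
-- index comprehension, then indexing; indices[idx] is ported as pyGetD (the filter keeps every
-- idx in range, so Python never raises there and the default is unreachable).
def build_current_surrounding_pairs (indices : List Int) (window_size : Int) : List (List Int) × List Int :=
  let l : Int := (indices.length : Int)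
  let step :=
    (PySem.List.enumerate indices 0).foldl
      (fun (acc : List (List Int) × List Int) iw =>
        let i := iw.1
        let w := iw.2
        if decide (window_size ≤ i) && decide (i ≤ l - 1 - window_size) then
          let windows : List Int :=
            ((PySem.List.pyRange (-window_size) (window_size + 1) 1).filter
              (fun j => decide (i + j ≥ 0) && decide (i + j < l) && decide (j ≠ 0))).map
              (fun j => i + j)
          (acc.1 ++ [windows.map (fun idx => PySem.List.pyGetD indices idx 0)], acc.2 ++ [w])
        else acc)
      ([], [])
  step

-- ===== PORT B =====
-- literal port of B: one slice for the centers, two concatenated slices per context window.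
def build_current_surrounding_pairs_alt (indices : List Int) (window_size : Int) : List (List Int) × List Int :=
  let l : Int := (indices.length : Int)
  let sur :=
    (PySem.List.pyRange window_size (l - window_size) 1).map
      (fun i =>
        PySem.List.slice indices (some (i - window_size)) (some i) ++
        PySem.List.slice indices (some (i + 1)) (some (i + window_size + 1)))
  let cur := PySem.List.slice indices (some window_size) (some (l - window_size))
  (sur, cur)

-- ===== PRECONDITION & SPEC =====
-- Pre_ restricts window_size to the function's natural domain (a nonnegative window width);
-- on negative window_size A still returns (all elements as centers, each with an empty context
-- list — an accident of the empty inner range), while B's slice arithmetic does not match it.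
def Pre_build_current_surrounding_pairs (indices : List Int) (window_size : Int) : Prop :=
  0 ≤ window_size
instance (indices : List Int) (window_size : Int) : Decidable (Pre_build_current_surrounding_pairs indices window_size) := by unfold Pre_build_current_surrounding_pairs; infer_instance

def pvWitness_build_current_surrounding_pairs : List Int × Int := ([1, 2, 3, 4, 5], 2)

def Spec_build_current_surrounding_pairs (indices : List Int) (window_size : Int) (out : List (List Int) × List Int) : Prop := out = build_current_surrounding_pairs_alt indices window_size
instance (indices : List Int) (window_size : Int) (out : List (List Int) × List Int) : Decidable (Spec_build_current_surrounding_pairs indices window_size out) := by unfold Spec_build_current_surrounding_pairs; infer_instance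

-- ===== CLAIM (what is proved, stated in full; the proofs are below) =====
def Claim_equal_build_current_surrounding_pairs : Prop := ∀ (indices : List Int) (window_size : Int), Dom_build_current_surrounding_pairs indices window_size → Pre_build_current_surrounding_pairs indices window_size → Spec_build_current_surrounding_pairs indices window_size (build_current_surrounding_pairs indices window_size)

-- ===== LEMMAS AND PROOFS =====

-- A's loop shape: conditional double-append folded over a list is a pair of maps of the filter.
theorem pv_foldl_pair_append {σ α β : Type} (xs : List σ) (p : σ → Bool)
    (f : σ → α) (g : σ → β) (as : List α) (bs : List β) :
    xs.foldl (fun acc s => if p s then (acc.1 ++ [f s], acc.2 ++ [g s]) else acc) (as, bs)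
      = (as ++ (xs.filter p).map f, bs ++ (xs.filter p).map g) := by
  induction xs generalizing as bs with
  | nil => simp
  | cons x xs ih =>
      by_cases h : p x
      · simp [List.foldl_cons, h, ih]
      · simp [List.foldl_cons, h, ih]

-- shifting a unit range
theorem pv_pyRange_shift (i a b : Int) :
    (PySem.List.pyRange a b 1).map (fun j => i + j) = PySem.List.pyRange (i + a) (i + b) 1 := by
  simp only [PySem.List.pyRange_one]
  have : (i + b - (i + a)).toNat = (b - a).toNat := by omega
  rw [this, List.map_map]
  exact List.map_congr_left (fun k _ => by simp; omega)

-- reading a unit range of in-range positions out of a list IS the slice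
theorem pv_map_pyGetD_eq_slice (xs : List Int) (a b : Int)
    (ha : 0 ≤ a) (hb : 0 ≤ b) (hbl : b ≤ (xs.length : Int)) :
    (PySem.List.pyRange a b 1).map (fun j => PySem.List.pyGetD xs j 0)
      = PySem.List.slice xs (some a) (some b) := by
  rw [PySem.List.slice_toNat xs ha hb]
  rcases le_or_gt b a with hba | hab
  · rw [PySem.List.pyRange_one_eq_nil hba]
    have : b.toNat - a.toNat = 0 := by omega
    simp [this]
  · apply List.ext_getElem
    · simp [PySem.List.length_pyRange_one]
      omega
    · intro k h1 h2
      simp only [List.getElem_map, PySem.List.getElem_pyRange_one, List.getElem_take,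
        List.getElem_drop]
      have hlen : k < (b - a).toNat := by
        simpa [PySem.List.length_pyRange_one] using h1
      rw [PySem.List.pyGetD_eq_getElem xs (i := a + (k : Int)) 0 (by omega) (by omega)]
      congr 1
      omega

-- the guarded enumerate indices of A are exactly range(window_size, l - window_size)
theorem pv_filter_range (l ws : Int) (hws : 0 ≤ ws) :
    (PySem.List.pyRange 0 l 1).filter
        (fun j => decide (ws ≤ j) && decide (j ≤ l - 1 - ws))
      = PySem.List.pyRange ws (l - ws) 1 := by
  rcases le_or_gt (l - ws) ws with h | h
  · rw [PySem.List.pyRange_one_eq_nil h, List.filter_eq_nil_iff]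
    intro j hj
    simp only [Bool.and_eq_true, decide_eq_true_eq, not_and]
    omega
  · rw [PySem.List.pyRange_one_append 0 ws l (by omega) (by omega),
        PySem.List.pyRange_one_append ws (l - ws) l (by omega) (by omega),
        List.filter_append, List.filter_append]
    have h1 : (PySem.List.pyRange 0 ws 1).filter
        (fun j => decide (ws ≤ j) && decide (j ≤ l - 1 - ws)) = [] := by
      rw [List.filter_eq_nil_iff]
      intro j hj
      have := (PySem.List.mem_pyRange_one).mp hj
      simp only [Bool.and_eq_true, decide_eq_true_eq, not_and]
      omega
    have h2 : (PySem.List.pyRange ws (l - ws) 1).filter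
        (fun j => decide (ws ≤ j) && decide (j ≤ l - 1 - ws))
        = PySem.List.pyRange ws (l - ws) 1 := by
      rw [List.filter_eq_self]
      intro j hj
      have := (PySem.List.mem_pyRange_one).mp hj
      simp only [Bool.and_eq_true, decide_eq_true_eq]
      omega
    have h3 : (PySem.List.pyRange (l - ws) l 1).filter
        (fun j => decide (ws ≤ j) && decide (j ≤ l - 1 - ws)) = [] := by
      rw [List.filter_eq_nil_iff]
      intro j hj
      have := (PySem.List.mem_pyRange_one).mp hj
      simp only [Bool.and_eq_true, decide_eq_true_eq, not_and]
      omega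
    simp [h1, h2, h3]

-- A's inner filtered offset range for an interior center i: the filter keeps all j ≠ 0
theorem pv_inner_filter (l ws i : Int) (hws : 0 ≤ ws) (hi : ws ≤ i) (hil : i < l - ws) :
    (PySem.List.pyRange (-ws) (ws + 1) 1).filter
        (fun j => decide (i + j ≥ 0) && decide (i + j < l) && decide (j ≠ 0))
      = PySem.List.pyRange (-ws) 0 1 ++ PySem.List.pyRange 1 (ws + 1) 1 := by
  have hsplit : PySem.List.pyRange (-ws) (ws + 1) 1
      = PySem.List.pyRange (-ws) 0 1 ++ (0 :: PySem.List.pyRange 1 (ws + 1) 1) := by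
    rw [PySem.List.pyRange_one_append (-ws) 0 (ws + 1) (by omega) (by omega),
        PySem.List.pyRange_one_cons (by omega : (0:Int) < ws + 1)]
    norm_num
  rw [hsplit, List.filter_append, List.filter_cons]
  have hall : ∀ j : Int, -ws ≤ j → j ≤ ws → j ≠ 0 →
      (decide (i + j ≥ 0) && decide (i + j < l) && decide (j ≠ 0)) = true := by
    intro j h1 h2 h3
    simp only [Bool.and_eq_true, decide_eq_true_eq]
    exact ⟨⟨by omega, by omega⟩, h3⟩
  have h1 : (PySem.List.pyRange (-ws) 0 1).filter
      (fun j => decide (i + j ≥ 0) && decide (i + j < l) && decide (j ≠ 0))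
      = PySem.List.pyRange (-ws) 0 1 := by
    rw [List.filter_eq_self]
    intro j hj
    have := (PySem.List.mem_pyRange_one).mp hj
    exact hall j (by omega) (by omega) (by omega)
  have h2 : (PySem.List.pyRange 1 (ws + 1) 1).filter
      (fun j => decide (i + j ≥ 0) && decide (i + j < l) && decide (j ≠ 0))
      = PySem.List.pyRange 1 (ws + 1) 1 := by
    rw [List.filter_eq_self]
    intro j hj
    have := (PySem.List.mem_pyRange_one).mp hj
    exact hall j (by omega) (by omega) (by omega)
  rw [h1, h2]
  have h0 : (decide (i + 0 ≥ 0) && decide (i + 0 < l) && decide ((0:Int) ≠ 0)) = false := by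
    simp
  rw [h0]
  simp

-- per interior center: A's gathered window equals B's two slices
theorem pv_window_eq (indices : List Int) (ws i : Int) (hws : 0 ≤ ws)
    (hi : ws ≤ i) (hil : i < (indices.length : Int) - ws) :
    (((PySem.List.pyRange (-ws) (ws + 1) 1).filter
        (fun j => decide (i + j ≥ 0) && decide (i + j < (indices.length : Int)) && decide (j ≠ 0))).map
        (fun j => i + j)).map (fun idx => PySem.List.pyGetD indices idx 0)
      = PySem.List.slice indices (some (i - ws)) (some i) ++
        PySem.List.slice indices (some (i + 1)) (some (i + ws + 1)) := by
  rw [pv_inner_filter (indices.length : Int) ws i hws hi hil, List.map_append, List.map_append,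
      pv_pyRange_shift i (-ws) 0, pv_pyRange_shift i 1 (ws + 1)]
  have e1 : i + -ws = i - ws := by ring
  have e2 : i + 0 = i := by ring
  have e3 : i + (ws + 1) = i + ws + 1 := by ring
  rw [e1, e2, e3,
      pv_map_pyGetD_eq_slice indices (i - ws) i (by omega) (by omega) (by omega),
      pv_map_pyGetD_eq_slice indices (i + 1) (i + ws + 1) (by omega) (by omega) (by omega)]

-- ===== VERDICT (by name: the statement is the Claim_ definition above) =====
theorem build_current_surrounding_pairs_spec : Claim_equal_build_current_surrounding_pairs := by
  intro indices ws _ hpre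
  have hws : 0 ≤ ws := hpre
  unfold Spec_build_current_surrounding_pairs
  unfold build_current_surrounding_pairs build_current_surrounding_pairs_alt
  rw [PySem.List.enumerate_eq_map_pyRange indices 0]
  simp only [PySem.List.len, List.foldl_map]
  rw [pv_foldl_pair_append, pv_filter_range ((indices.length : Nat) : Int) ws hws,
      Prod.mk.injEq]
  constructor
  · -- sur component
    simp only [List.nil_append]
    apply List.map_congr_left
    intro i hi
    have hmem := (PySem.List.mem_pyRange_one).mp hi
    exact pv_window_eq indices ws i hws hmem.1 hmem.2
  · -- cur component
    simp only [List.nil_append]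
    rcases le_or_gt ws ((indices.length : Nat) : Int) with hwl | hwl
    · exact pv_map_pyGetD_eq_slice indices ws (((indices.length : Nat) : Int) - ws) hws
        (by omega) (by omega)
    · -- window wider than the list: both sides are empty
      rw [PySem.List.pyRange_one_eq_nil (by omega), List.map_nil]
      symm
      rw [← List.length_eq_zero_iff, PySem.List.length_slice]
      obtain ⟨m, rfl⟩ : ∃ m : Nat, ws = (m : Int) := ⟨ws.toNat, by omega⟩
      rw [PySem.List.clampIdx_natCast]
      have h2 := PySem.List.clampIdx_le indices.length (((indices.length : Nat) : Int) - (m : Int))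
      omega
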